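-- pv_equiv track=rewrite | github.com/FaWald/TI-Calc | teilerfremd.py | find_a_candidates
-- ===== SOURCE A (Python) =====
-- def gcd(a, b):
--     a = abs(a)
--     b = abs(b)
--     while b != 0:
--         a, b = b, a % b
--     return a
--
-- def find_a_candidates(m, count):
--     res = []
--     a = 2
--     while a < m and len(res) < count:
--         if gcd(a, m) == 1:
--             res.append(a)
--         a += 1
--     return res
-- ===== SOURCE B (Python) =====
-- def find_a_candidates(m, count):
--     # Factor |m| once into its distinct prime factors, then collect the first
--     # `count` values a in [2, m) divisible by none of them.
--     primes = []
--     n = abs(m)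
--     d = 2
--     while d * d <= n:
--         if n % d == 0:
--             primes.append(d)
--             while n % d == 0:
--                 n //= d
--         d += 1
--     if n > 1:
--         primes.append(n)
--     res = []
--     a = 2
--     while a < m and len(res) < count:
--         for p in primes:
--             if a % p == 0:
--                 break
--         else:
--             res.append(a)
--         a += 1
--     return res
-- ===== Notes on version B (the rewrite author's own statement) =====
-- stated objective: faster
-- what changed: Instead of running a Euclidean gcd against m for every candidate a, B factors |m| once into its distinct prime factors by trial division and then tests each candidate only for divisibility by those few primes.
import Mathlib
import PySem

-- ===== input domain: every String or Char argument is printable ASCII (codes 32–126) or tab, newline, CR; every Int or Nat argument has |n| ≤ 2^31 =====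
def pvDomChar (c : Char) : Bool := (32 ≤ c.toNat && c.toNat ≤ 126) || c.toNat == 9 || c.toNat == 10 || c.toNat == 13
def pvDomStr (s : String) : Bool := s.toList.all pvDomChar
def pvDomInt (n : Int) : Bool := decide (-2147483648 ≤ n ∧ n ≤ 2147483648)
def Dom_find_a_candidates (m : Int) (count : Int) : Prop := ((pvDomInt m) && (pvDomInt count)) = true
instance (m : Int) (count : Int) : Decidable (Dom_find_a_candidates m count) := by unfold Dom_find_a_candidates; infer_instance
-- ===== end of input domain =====

-- B replaces A's per-element Euclidean-gcd test by a one-time trial-division factorisation of |m|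
-- followed by divisibility tests against the distinct prime factors (objective: faster, constant-factor).
-- Every while-loop is ported with an explicit Nat fuel that over-approximates its iteration count
-- (a totality guard only; the fuel-adequacy lemmas below show it is never exhausted).

-- ===== PORT A =====
-- the 'while b != 0' loop of A's gcd; fuel ≥ |b| + 1 suffices
def pvGcdLoop : Nat → Int → Int → Int
  | 0, a, _ => a
  | fuel + 1, a, b => if b ≠ 0 then pvGcdLoop fuel b (PySem.Int.mod a b) else a

def pvGcdA (a b : Int) : Int := pvGcdLoop (b.natAbs + 1) |a| |b|

-- the 'while a < m and len(res) < count' loop of A; fuel ≥ (m - a).toNat suffices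
def pvLoopA : Nat → Int → Int → Int → List Int → List Int
  | 0, _, _, _, res => res
  | fuel + 1, m, count, a, res =>
    if a < m ∧ (res.length : Int) < count then
      pvLoopA fuel m count (a + 1) (if pvGcdA a m = 1 then res ++ [a] else res)
    else res

def find_a_candidates (m : Int) (count : Int) : List Int :=
  pvLoopA (m - 2).toNat m count 2 []

-- ===== PORT B =====
-- 'while n % d == 0: n //= d'; fuel ≥ nn.toNat suffices
def pvStrip : Nat → Int → Int → Int
  | 0, nn, _ => nn
  | fuel + 1, nn, d =>
    if PySem.Int.mod nn d = 0 then pvStrip fuel (PySem.Int.floordiv nn d) d else nn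

-- 'while d*d <= n: …' trial-division loop; returns (final n, primes found); fuel ≥ (nn + 1 - d).toNat suffices
def pvFacLoop : Nat → Int → Int → List Int → Int × List Int
  | 0, nn, _, primes => (nn, primes)
  | fuel + 1, nn, d, primes =>
    if d * d ≤ nn then
      if PySem.Int.mod nn d = 0 then
        pvFacLoop fuel (pvStrip nn.toNat nn d) (d + 1) (primes ++ [d])
      else pvFacLoop fuel nn (d + 1) primes
    else (nn, primes)

-- 'while a < m and len(res) < count' loop of B, testing against the prime list
def pvLoopB : Nat → Int → Int → List Int → Int → List Int → List Int
  | 0, _, _, _, _, res => res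
  | fuel + 1, m, count, primes, a, res =>
    if a < m ∧ (res.length : Int) < count then
      pvLoopB fuel m count primes (a + 1)
        (if primes.all (fun p => PySem.Int.mod a p != 0) then res ++ [a] else res)
    else res

def find_a_candidates_alt (m : Int) (count : Int) : List Int :=
  let r := pvFacLoop (|m| - 1).toNat |m| 2 []
  let primes := if 1 < r.1 then r.2 ++ [r.1] else r.2
  pvLoopB (m - 2).toNat m count primes 2 []

-- ===== PRECONDITION & SPEC =====
def Spec_find_a_candidates (m : Int) (count : Int) (out : List Int) : Prop := out = find_a_candidates_alt m count
instance (m : Int) (count : Int) (out : List Int) : Decidable (Spec_find_a_candidates m count out) := by unfold Spec_find_a_candidates; infer_instance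

-- ===== CLAIM (what is proved, stated in full; the proofs are below) =====
def Claim_equal_find_a_candidates : Prop := ∀ (m : Int) (count : Int), Dom_find_a_candidates m count → Spec_find_a_candidates m count (find_a_candidates m count)

-- ===== LEMMAS AND PROOFS =====

-- division facts used throughout
theorem pvEdivLt (nn d : Int) (hnn : 0 < nn) (hd : 1 < d) :
    nn / d < nn ∧ 0 ≤ nn / d := by
  have hq0 : 0 ≤ nn / d := Int.ediv_nonneg (by omega) (by omega)
  have hmod := Int.mul_ediv_add_emod nn d
  have hr0 : 0 ≤ nn % d := Int.emod_nonneg nn (by omega)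
  have h2q : 2 * (nn / d) ≤ d * (nn / d) := by nlinarith
  exact ⟨by linarith, hq0⟩

theorem pvDMulDLe (nn d : Int) (_hd : 2 ≤ d) (h : d * d ≤ nn) : 2 * d - 1 ≤ nn := by
  nlinarith [sq_nonneg (d - 1)]

-- A's Euclidean loop computes Nat.gcd (fuel adequacy: y < fuel)
theorem pvGcdLoop_natCast (fuel x y : Nat) (hf : y < fuel) :
    pvGcdLoop fuel (x : Int) (y : Int) = (Nat.gcd y x : Int) := by
  induction fuel generalizing x y with
  | zero => omega
  | succ fuel ih =>
    rw [pvGcdLoop]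
    by_cases hy : (y : Int) ≠ 0
    · have hmlt : x % y < y := Nat.mod_lt _ (by omega)
      rw [if_pos hy, PySem.Int.mod_natCast, ih y (x % y) (by omega)]
      exact congrArg _ (Nat.gcd_rec y x).symm
    · have hy0 : y = 0 := by omega
      rw [if_neg hy]
      simp [hy0]

theorem pvGcdA_eq (a b : Int) : pvGcdA a b = (Nat.gcd b.natAbs a.natAbs : Int) := by
  unfold pvGcdA
  rw [Int.abs_eq_natAbs, Int.abs_eq_natAbs]
  exact pvGcdLoop_natCast (b.natAbs + 1) a.natAbs b.natAbs (by omega)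

-- the prime list finally used by B
def pvFinal (fuel : Nat) (nn d : Int) (acc : List Int) : List Int :=
  if 1 < (pvFacLoop fuel nn d acc).1 then (pvFacLoop fuel nn d acc).2 ++ [(pvFacLoop fuel nn d acc).1]
  else (pvFacLoop fuel nn d acc).2

-- pvStrip removes exactly the factor d (fuel adequacy: nn.toNat ≤ fuel)
theorem pvStrip_spec (fuel : Nat) (nn d : Int) (hd : 1 < d) (hnn : 0 < nn)
    (hf : nn.toNat ≤ fuel) :
    ∃ k : Nat, nn = d ^ k * pvStrip fuel nn d ∧ ¬ d ∣ pvStrip fuel nn d ∧ 0 < pvStrip fuel nn d := by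
  induction fuel generalizing nn with
  | zero => omega
  | succ fuel ih =>
    by_cases h : PySem.Int.mod nn d = 0
    · have hstripEq : pvStrip (fuel + 1) nn d = pvStrip fuel (nn / d) d := by
        rw [pvStrip, if_pos h, PySem.Int.floordiv_eq_ediv_of_pos (show (0:Int) < d by omega)]
      have hdvd : d ∣ nn := (PySem.Int.mod_eq_zero_iff_dvd nn d).mp h
      have hmul : nn / d * d = nn := Int.ediv_mul_cancel hdvd
      have hq := pvEdivLt nn d hnn hd
      have hqpos : 0 < nn / d := by
        rcases lt_or_eq_of_le hq.2 with h' | h'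
        · exact h'
        · exfalso; rw [← hmul, ← h'] at hnn; simp at hnn
      obtain ⟨k, hk, hnd, hpos⟩ := ih (nn / d) hqpos (by omega)
      set s := pvStrip fuel (nn / d) d with hs
      refine ⟨k + 1, ?_, by rw [hstripEq]; exact hnd, by rw [hstripEq]; exact hpos⟩
      rw [hstripEq]
      calc nn = nn / d * d := hmul.symm
        _ = d ^ k * s * d := by rw [hk]
        _ = d ^ (k + 1) * s := by ring
    · have hnd : ¬ d ∣ nn := fun hdvd => h ((PySem.Int.mod_eq_zero_iff_dvd nn d).mpr hdvd)
      have hstripEq : pvStrip (fuel + 1) nn d = nn := by rw [pvStrip, if_neg h]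
      exact ⟨0, by rw [hstripEq]; ring, by rw [hstripEq]; exact hnd, by rw [hstripEq]; exact hnn⟩

-- a number > 1 with no divisor in [2, d) and < d*d is prime
theorem pvPrimeOfNoSmallFac (nn d : Int) (hd : 2 ≤ d) (h1 : 1 < nn) (hlt : nn < d * d)
    (hsmall : ∀ e : Int, 2 ≤ e → e < d → ¬ e ∣ nn) : Prime nn := by
  rw [Int.prime_iff_natAbs_prime]
  by_contra hnp
  have h2 : 2 ≤ nn.natAbs := by omega
  have hsq := Nat.minFac_sq_le_self (by omega) hnp
  have hdvd : (nn.natAbs.minFac : Int) ∣ nn := by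
    have h' : (nn.natAbs.minFac : Int) ∣ (nn.natAbs : Int) :=
      Int.natCast_dvd_natCast.mpr (Nat.minFac_dvd nn.natAbs)
    rwa [Int.natAbs_of_nonneg (by omega)] at h'
  have hple : (nn.natAbs.minFac : Int) * (nn.natAbs.minFac : Int) ≤ nn := by
    have h' : ((nn.natAbs.minFac : Int)) ^ 2 ≤ (nn.natAbs : Int) := by exact_mod_cast hsq
    rw [Int.natAbs_of_nonneg (by omega)] at h'
    nlinarith [h']
  have hp2 : 2 ≤ (nn.natAbs.minFac : Int) := by
    have := (Nat.minFac_prime (show nn.natAbs ≠ 1 by omega)).two_le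
    exact_mod_cast this
  have hltd : (nn.natAbs.minFac : Int) < d := by
    rcases lt_or_ge ((nn.natAbs.minFac : Int)) d with h' | h'
    · exact h'
    · exfalso
      have := mul_le_mul h' h' (by omega : (0:Int) ≤ d)
        (by omega : (0:Int) ≤ (nn.natAbs.minFac : Int))
      linarith
  exact hsmall _ hp2 hltd hdvd

-- d itself is prime when it divides nn and nn has no factor in [2, d)
theorem pvDPrime (nn d : Int) (hd : 2 ≤ d) (hdvd : d ∣ nn)
    (hsmall : ∀ e : Int, 2 ≤ e → e < d → ¬ e ∣ nn) : Prime d := by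
  rw [Int.prime_iff_natAbs_prime]
  refine Nat.prime_def_lt.mpr ⟨by omega, ?_⟩
  intro mm hmm hmmdvd
  by_contra hne
  have hmm2 : 2 ≤ mm := by
    rcases Nat.lt_or_ge mm 2 with h' | h'
    · interval_cases mm
      · exfalso
        have : d.natAbs = 0 := Nat.eq_zero_of_zero_dvd hmmdvd
        omega
      · exact absurd rfl hne
    · exact h'
  have he : ((mm : Int)) ∣ d := by
    have h' : (mm : Int) ∣ (d.natAbs : Int) := Int.natCast_dvd_natCast.mpr hmmdvd
    rwa [Int.natAbs_of_nonneg (by omega)] at h'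
  exact hsmall mm (by exact_mod_cast hmm2) (by omega) (dvd_trans he hdvd)

-- core invariant of the trial-division loop: the final list tests exactly coprimality with nn
theorem pvFacLoop_key (fuel : Nat) (nn d : Int) (acc : List Int) (a : Int)
    (hd : 2 ≤ d) (hnn : 1 ≤ nn)
    (hsmall : ∀ e : Int, 2 ≤ e → e < d → ¬ e ∣ nn)
    (hf : (nn + 1 - d).toNat ≤ fuel) :
    ((∀ p ∈ pvFinal fuel nn d acc, ¬ p ∣ a) ↔ ((∀ p ∈ acc, ¬ p ∣ a) ∧ IsCoprime nn a)) := by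
  induction fuel generalizing nn d acc with
  | zero =>
    -- fuel 0 forces d > nn, so the loop would exit at once anyway
    have hdd : ¬ d * d ≤ nn := by
      intro hdd
      have := pvDMulDLe nn d hd hdd
      omega
    have hdnn : nn < d := by omega
    have hfac : pvFacLoop 0 nn d acc = (nn, acc) := rfl
    by_cases h1 : 1 < nn
    · have hp : Prime nn := pvPrimeOfNoSmallFac nn d hd h1 (by nlinarith) hsmall
      have hfin : pvFinal 0 nn d acc = acc ++ [nn] := by
        unfold pvFinal; rw [hfac]; simp [h1]
      rw [hfin]
      simp only [List.mem_append, List.mem_singleton]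
      constructor
      · intro h
        exact ⟨fun p hp' => h p (Or.inl hp'),
          (hp.coprime_iff_not_dvd).mpr (h nn (Or.inr rfl))⟩
      · rintro ⟨ha, hco⟩ p hp'
        rcases hp' with hp' | hp'
        · exact ha p hp'
        · exact hp' ▸ (hp.coprime_iff_not_dvd).mp hco
    · have hnn1 : nn = 1 := by omega
      have hfin : pvFinal 0 nn d acc = acc := by
        unfold pvFinal; rw [hfac]; simp [h1]
      rw [hfin, hnn1]
      simp [isCoprime_one_left]
  | succ fuel ih =>
    by_cases hdd : d * d ≤ nn
    · have h2d : 2 * d - 1 ≤ nn := pvDMulDLe nn d hd hdd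
      have hfac : pvFacLoop (fuel + 1) nn d acc =
          (if PySem.Int.mod nn d = 0 then pvFacLoop fuel (pvStrip nn.toNat nn d) (d + 1) (acc ++ [d])
           else pvFacLoop fuel nn (d + 1) acc) := by
        rw [pvFacLoop, if_pos hdd]
      by_cases hm : PySem.Int.mod nn d = 0
      · have hdvd : d ∣ nn := (PySem.Int.mod_eq_zero_iff_dvd nn d).mp hm
        have hdp : Prime d := pvDPrime nn d hd hdvd hsmall
        obtain ⟨k, hk, hnd, hpos⟩ := pvStrip_spec nn.toNat nn d (by omega) (by omega) (le_refl _)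
        set s := pvStrip nn.toNat nn d with hs
        have hsle : s ≤ nn := by
          have h1 : (1:Int) ≤ d ^ k := one_le_pow₀ (by omega)
          nlinarith [hk, hpos]
        have hstripdvd : s ∣ nn := by
          refine ⟨d ^ k, ?_⟩
          conv_lhs => rw [hk]
          ring
        have hsmall' : ∀ e : Int, 2 ≤ e → e < d + 1 → ¬ e ∣ s := by
          intro e he2 helt hedvd
          rcases lt_or_eq_of_le (show e ≤ d by omega) with h' | h'
          · exact hsmall e he2 h' (dvd_trans hedvd hstripdvd)
          · exact hnd (h' ▸ hedvd)
        have hfin : pvFinal (fuel + 1) nn d acc = pvFinal fuel s (d + 1) (acc ++ [d]) := by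
          unfold pvFinal
          rw [hfac, if_pos hm]
        have IH := ih s (d + 1) (acc ++ [d]) (by omega) (by omega) hsmall' (by omega)
        rw [hfin, IH]
        have hiff : IsCoprime nn a ↔ (¬ d ∣ a ∧ IsCoprime s a) := by
          constructor
          · intro hco
            refine ⟨?_, IsCoprime.of_isCoprime_of_dvd_left hco hstripdvd⟩
            exact (hdp.coprime_iff_not_dvd).mp (IsCoprime.of_isCoprime_of_dvd_left hco hdvd)
          · rintro ⟨hnda, hco⟩
            have h1 : IsCoprime d a := (hdp.coprime_iff_not_dvd).mpr hnda
            have h2 : IsCoprime (d ^ k * s) a :=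
              IsCoprime.mul_left (IsCoprime.pow_left h1) hco
            rwa [← hk] at h2
        rw [hiff]
        simp only [List.mem_append, List.mem_singleton]
        constructor
        · rintro ⟨h1, h2⟩
          exact ⟨fun p hp => h1 p (Or.inl hp), h1 d (Or.inr rfl), h2⟩
        · rintro ⟨h1, h2, h3⟩
          exact ⟨fun p hp => hp.elim (h1 p) (fun he => he ▸ h2), h3⟩
      · have hnd : ¬ d ∣ nn := fun hdvd => hm ((PySem.Int.mod_eq_zero_iff_dvd nn d).mpr hdvd)
        have hsmall' : ∀ e : Int, 2 ≤ e → e < d + 1 → ¬ e ∣ nn := by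
          intro e he2 helt
          rcases lt_or_eq_of_le (show e ≤ d by omega) with h' | h'
          · exact hsmall e he2 h'
          · exact h' ▸ hnd
        have hfin : pvFinal (fuel + 1) nn d acc = pvFinal fuel nn (d + 1) acc := by
          unfold pvFinal
          rw [hfac, if_neg hm]
        rw [hfin]
        exact ih nn (d + 1) acc (by omega) hnn hsmall' (by omega)
    · have hfac : pvFacLoop (fuel + 1) nn d acc = (nn, acc) := by
        rw [pvFacLoop, if_neg hdd]
      by_cases h1 : 1 < nn
      · have hp : Prime nn := pvPrimeOfNoSmallFac nn d hd h1 (by omega) hsmall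
        have hfin : pvFinal (fuel + 1) nn d acc = acc ++ [nn] := by
          unfold pvFinal; rw [hfac]; simp [h1]
        rw [hfin]
        simp only [List.mem_append, List.mem_singleton]
        constructor
        · intro h
          exact ⟨fun p hp' => h p (Or.inl hp'),
            (hp.coprime_iff_not_dvd).mpr (h nn (Or.inr rfl))⟩
        · rintro ⟨ha, hco⟩ p hp'
          rcases hp' with hp' | hp'
          · exact ha p hp'
          · exact hp' ▸ (hp.coprime_iff_not_dvd).mp hco
      · have hnn1 : nn = 1 := by omega
        have hfin : pvFinal (fuel + 1) nn d acc = acc := by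
          unfold pvFinal; rw [hfac]; simp [h1]
        rw [hfin, hnn1]
        simp [isCoprime_one_left]

-- per-element agreement of the two tests, for m ≥ 1
theorem pvTest_eq (m a : Int) (hm : 1 ≤ m) :
    (pvGcdA a m = 1) ↔
      ((pvFinal (m - 1).toNat m 2 []).all (fun p => PySem.Int.mod a p != 0) = true) := by
  have hkey := pvFacLoop_key (m - 1).toNat m 2 [] a (le_refl 2) hm
    (by intro e he2 helt; omega) (by omega)
  have hgcd : pvGcdA a m = 1 ↔ IsCoprime m a := by
    rw [pvGcdA_eq, Int.isCoprime_iff_gcd_eq_one]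
    have : Int.gcd m a = Nat.gcd m.natAbs a.natAbs := rfl
    rw [this]
    exact_mod_cast Iff.rfl
  rw [hgcd, List.all_eq_true]
  constructor
  · intro hco p hp
    have := (hkey.mpr ⟨by simp, hco⟩) p hp
    simp only [bne_iff_ne, ne_eq]
    intro hmod
    exact this ((PySem.Int.mod_eq_zero_iff_dvd a p).mp hmod)
  · intro hall
    have : ∀ p ∈ pvFinal (m - 1).toNat m 2 [], ¬ p ∣ a := by
      intro p hp hdvd
      have := hall p hp
      simp only [bne_iff_ne, ne_eq] at this
      exact this ((PySem.Int.mod_eq_zero_iff_dvd a p).mpr hdvd)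
    exact (hkey.mp this).2

-- loop congruence: pointwise-equal tests give equal loops (same fuel on both sides)
theorem pvLoops_eq (fuel : Nat) (m count : Int) (primes : List Int) (a : Int) (res : List Int)
    (h : ∀ x : Int, (pvGcdA x m = 1) ↔ (primes.all (fun p => PySem.Int.mod x p != 0) = true)) :
    pvLoopA fuel m count a res = pvLoopB fuel m count primes a res := by
  induction fuel generalizing a res with
  | zero => rfl
  | succ fuel ih =>
    rw [pvLoopA, pvLoopB]
    split
    · have hx := h a
      have hbodies : (if pvGcdA a m = 1 then res ++ [a] else res)
          = (if primes.all (fun p => PySem.Int.mod a p != 0) then res ++ [a] else res) := by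
        by_cases hg : pvGcdA a m = 1
        · simp [hg, hx.mp hg]
        · have hb : ¬ (primes.all (fun p => PySem.Int.mod a p != 0) = true) :=
            fun hb => hg (hx.mpr hb)
          simp [hg, hb]
      rw [hbodies]
      exact ih (a + 1) _
    · rfl

-- ===== VERDICT (by name: the statement is the Claim_ definition above) =====
theorem find_a_candidates_spec : Claim_equal_find_a_candidates := by
  intro m count _
  unfold Spec_find_a_candidates find_a_candidates find_a_candidates_alt
  by_cases hm : 2 < m
  · have habs : |m| = m := abs_of_pos (by omega)
    simp only [habs]
    exact pvLoops_eq (m - 2).toNat m count (pvFinal (m - 1).toNat m 2 []) 2 []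
      (fun x => pvTest_eq m x (by omega))
  · have hf : (m - 2).toNat = 0 := by omega
    simp only [hf]
    rfl
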